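-- pv_equiv track=rewrite | github.com/ofdun/BMSTU-Programming | laba12/utils/alignment.py | alignRight
-- ===== SOURCE A (Python) =====
-- def alignRight(text: list[str]) -> list[str]:
--     newText = []
--     maxLength = 0
--     text = reduceSpaces(text)
--     for line in text:
--         if len(line) > maxLength:
--             maxLength = len(line)
--     for line in text:
--         newText.append(" " * (maxLength - len(line)) + line)
--     return newText
--
-- def reduceSpaces(text: list[str]) -> list[str]:
--     newText = []
--     for line in text:
--         string = ""
--         wasSpace = False
--         for i, c in enumerate(line):
--             if c == ' ':
--                 wasSpace = True
--             else:
--                 if wasSpace: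
--                     string += ' ' + c if string else c
--                     wasSpace = False
--                 else:
--                     string += c
--         newText.append(string)
--     return newText
-- ===== SOURCE B (Python) =====
-- def alignRight(text: list[str]) -> list[str]:
--     lines = [' '.join(w for w in line.split(' ') if w) for line in text]
--     width = max(map(len, lines), default=0)
--     return [line.rjust(width) for line in lines]
-- ===== Notes on version B (the rewrite author's own statement) =====
-- stated objective: idiomatic
-- what changed: Replaces the character-by-character wasSpace state machine with a word-level split(' ')/filter/join to collapse spaces, and pads with str.rjust against a max() over lengths.
import Mathlib
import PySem

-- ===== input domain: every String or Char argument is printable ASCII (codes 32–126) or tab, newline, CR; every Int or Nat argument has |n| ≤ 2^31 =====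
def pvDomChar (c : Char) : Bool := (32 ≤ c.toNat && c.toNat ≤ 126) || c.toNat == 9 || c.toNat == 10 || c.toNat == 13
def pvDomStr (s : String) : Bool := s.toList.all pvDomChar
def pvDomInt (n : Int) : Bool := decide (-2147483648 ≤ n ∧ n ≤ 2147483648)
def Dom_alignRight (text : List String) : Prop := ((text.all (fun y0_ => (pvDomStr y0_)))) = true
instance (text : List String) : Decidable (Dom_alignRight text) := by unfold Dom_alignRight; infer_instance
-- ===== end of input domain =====

-- B collapses repeated spaces with split(' ')/filter/join and right-pads with rjust,
-- replacing A's character-by-character wasSpace state machine (idiomatic rewrite, same cost).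


-- ===== PORT A =====
-- the inner character loop of reduceSpaces: state = (string, wasSpace)
def pvReduceStep (st : List Char × Bool) (c : Char) : List Char × Bool :=
  if c = ' ' then (st.1, true)
  else if st.2 then
    (if st.1 ≠ [] then (st.1 ++ [' ', c], false) else (st.1 ++ [c], false))
  else (st.1 ++ [c], false)

def pvReduceLine (line : String) : List Char :=
  (line.toList.foldl pvReduceStep ([], false)).1

-- reduceSpaces: the append loop over lines
def pvReduceSpaces (text : List String) : List String :=
  text.foldl (fun nt line => nt ++ [String.ofList (pvReduceLine line)]) []

def alignRight (text : List String) : List String :=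
  let t := pvReduceSpaces text
  let maxLength := t.foldl (fun m line => if line.toList.length > m then line.toList.length else m) 0
  t.foldl (fun nt line => nt ++ [String.ofList (List.replicate (maxLength - line.toList.length) ' ' ++ line.toList)]) []

-- ===== PORT B =====
-- ' '.join(w for w in line.split(' ') if w)
def pvCollapse (line : String) : List Char :=
  PySem.Chars.join [' '] ((PySem.Chars.splitOn line.toList [' ']).filter (fun w => w ≠ []))

def alignRight_alt (text : List String) : List String :=
  let lines := text.map (fun line => String.ofList (pvCollapse line))
  let width := PySem.List.maxD (lines.map (fun l => l.toList.length)) (fun y => y) 0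
  lines.map (fun l => String.ofList (List.replicate (width - l.toList.length) ' ' ++ l.toList))

-- ===== PRECONDITION & SPEC =====
def Spec_alignRight (text : List String) (out : List String) : Prop := out = alignRight_alt text
instance (text : List String) (out : List String) : Decidable (Spec_alignRight text out) := by unfold Spec_alignRight; infer_instance

-- ===== CLAIM (what is proved, stated in full; the proofs are below) =====
def Claim_equal_alignRight : Prop := ∀ (text : List String), Dom_alignRight text → Spec_alignRight text (alignRight text)

-- ===== LEMMAS AND PROOFS =====

-- reference splitter: mySplit l cur = chunks of l split at ' ', cur = reversed current chunk
def pvMySplit : List Char → List Char → List (List Char)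
  | [], cur => [cur.reverse]
  | c :: rest, cur => if c = ' ' then cur.reverse :: pvMySplit rest [] else pvMySplit rest (c :: cur)

-- join of the nonempty chunks
def pvJ (xs : List (List Char)) : List Char :=
  PySem.Chars.join [' '] (xs.filter (fun w => w ≠ []))

lemma pvSplitOn_go_eq (l : List Char) : ∀ (fuel : Nat) (cur : List Char) (acc : List (List Char)),
    l.length < fuel →
    PySem.Chars.splitOn.go [' '] fuel l cur acc = acc.reverse ++ pvMySplit l cur := by
  induction l with
  | nil =>
    intro fuel cur acc h
    match fuel with
    | f + 1 => simp [PySem.Chars.splitOn.go, pvMySplit]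
  | cons c rest ih =>
    intro fuel cur acc h
    match fuel with
    | f + 1 =>
      by_cases hc : c = ' '
      · subst hc
        simp only [PySem.Chars.splitOn.go, List.isPrefixOf, pvMySplit]
        simp only [BEq.rfl, Bool.true_and, if_true, List.length_singleton,
          List.drop_succ_cons, List.drop_zero]
        rw [ih f [] (cur.reverse :: acc) (by simpa using Nat.lt_of_succ_lt_succ h)]
        simp
      · simp only [PySem.Chars.splitOn.go, List.isPrefixOf, Bool.and_true]
        have hcc : (' ' == c) = false := by
          simp only [beq_eq_false_iff_ne, ne_eq]
          exact fun h' => hc h'.symm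
        rw [hcc]
        simp only [Bool.false_eq_true, if_false]
        rw [ih f (c :: cur) acc (by simpa using Nat.lt_of_succ_lt_succ h)]
        simp [pvMySplit, hc]

lemma pvSplitOn_eq (l : List Char) : PySem.Chars.splitOn l [' '] = pvMySplit l [] := by
  unfold PySem.Chars.splitOn
  rw [pvSplitOn_go_eq l (l.length + 1) [] [] (by omega)]
  simp

-- glueing lemma: a single chunk containing one inner space joins like two chunks
lemma pvT (a b : List Char) (rest : List (List Char)) (ha : a ≠ []) (hb : b ≠ []) :
    pvJ ((a ++ ' ' :: b) :: rest) = pvJ (a :: b :: rest) := by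
  unfold pvJ
  have h1 : (a ++ ' ' :: b) ≠ [] := by simp
  simp only [List.filter_cons, h1, ha, hb, ne_eq, decide_not, Bool.not_eq_eq_eq_not]
  cases hF : List.filter (fun w => !decide (w = [])) rest with
  | nil => simp [PySem.Chars.join_cons_cons, PySem.Chars.join_singleton]
  | cons q t => simp [PySem.Chars.join_cons_cons, List.append_assoc]

-- pvJ ignores empty chunks and keeps nonempty ones
lemma pvJ_singleton (a : List Char) : pvJ [a] = a := by
  unfold pvJ
  by_cases h : a = []
  · simp [h, PySem.Chars.join_nil]
  · simp [h, PySem.Chars.join_singleton]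

lemma pvJ_head_nil (r : List (List Char)) : pvJ ([] :: r) = pvJ r := by
  unfold pvJ; simp

lemma pvJ_mid_nil (a : List Char) (r : List (List Char)) : pvJ (a :: [] :: r) = pvJ (a :: r) := by
  unfold pvJ; simp [List.filter_cons]

-- the embedded-space lemma
lemma pvS (l : List Char) : ∀ (cur pre : List Char), cur ≠ [] → pre ≠ [] →
    pvJ (pvMySplit l (cur ++ ' ' :: pre)) = pvJ (pre.reverse :: pvMySplit l cur) := by
  induction l with
  | nil =>
    intro cur pre hc hp
    simp only [pvMySplit, List.reverse_append, List.reverse_cons]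
    have := pvT pre.reverse cur.reverse [] (by simpa using hp) (by simpa using hc)
    simpa [List.append_assoc] using this
  | cons c rest ih =>
    intro cur pre hc hp
    by_cases hcsp : c = ' '
    · subst hcsp
      simp only [pvMySplit, if_true, List.reverse_append, List.reverse_cons]
      have := pvT pre.reverse cur.reverse (pvMySplit rest []) (by simpa using hp) (by simpa using hc)
      simpa [List.append_assoc] using this
    · simp only [pvMySplit, hcsp, if_false]
      have h1 : c :: (cur ++ ' ' :: pre) = (c :: cur) ++ ' ' :: pre := rfl
      rw [h1, ih (c :: cur) pre (by simp) hp]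

-- A's fold against the chunk view
lemma pvFold_eq (l : List Char) : ∀ (acc : List Char),
    ((l.foldl pvReduceStep (acc, false)).1 = pvJ (pvMySplit l acc.reverse)) ∧
    ((l.foldl pvReduceStep (acc, true)).1 = pvJ (acc :: pvMySplit l [])) := by
  induction l with
  | nil =>
    intro acc
    refine ⟨?_, ?_⟩
    · simp only [List.foldl, pvMySplit, List.reverse_reverse]
      exact (pvJ_singleton acc).symm
    · simp only [List.foldl, pvMySplit, List.reverse_nil]
      rw [pvJ_mid_nil, pvJ_singleton]
  | cons c rest ih =>
    intro acc
    refine ⟨?_, ?_⟩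
    · by_cases hc : c = ' '
      · subst hc
        have hstep : pvReduceStep (acc, false) ' ' = (acc, true) := by
          simp [pvReduceStep]
        simp only [List.foldl, hstep, pvMySplit, if_true, List.reverse_reverse]
        exact (ih acc).2
      · have hstep : pvReduceStep (acc, false) c = (acc ++ [c], false) := by
          simp [pvReduceStep, hc]
        simp only [List.foldl, hstep, pvMySplit, hc, if_false]
        have := (ih (acc ++ [c])).1
        simpa using this
    · by_cases hc : c = ' '
      · subst hc
        have hstep : pvReduceStep (acc, true) ' ' = (acc, true) := by
          simp [pvReduceStep]
        simp only [List.foldl, hstep, pvMySplit, if_true, List.reverse_nil]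
        rw [pvJ_mid_nil]
        exact (ih acc).2
      · by_cases ha : acc = []
        · subst ha
          have hstep : pvReduceStep (([] : List Char), true) c = ([c], false) := by
            simp [pvReduceStep, hc]
          simp only [List.foldl, hstep, pvMySplit, hc, if_false]
          rw [pvJ_head_nil]
          have := (ih [c]).1
          simpa using this
        · have hstep : pvReduceStep (acc, true) c = (acc ++ [' ', c], false) := by
            simp [pvReduceStep, hc, ha]
          simp only [List.foldl, hstep, pvMySplit, hc, if_false]
          have h1 := (ih (acc ++ [' ', c])).1
          have h2 : (acc ++ [' ', c]).reverse = [c] ++ ' ' :: acc.reverse := by simp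
          rw [h2] at h1
          rw [h1, pvS rest [c] acc.reverse (by simp) (by simpa using ha)]
          simp

lemma pvLine_eq (line : String) : pvReduceLine line = pvCollapse line := by
  unfold pvReduceLine pvCollapse
  rw [pvSplitOn_eq]
  exact (pvFold_eq line.toList []).1

-- Nat max fold lemmas
lemma pvMax_eq (xs : List Nat) :
    xs.foldl (fun m l => if l > m then l else m) 0 = PySem.List.maxD xs (fun y => y) 0 := by
  have hf : (fun (m l : Nat) => if l > m then l else m) = max :=
    funext fun m => funext fun l => by split <;> omega
  cases xs with
  | nil => rfl
  | cons x r =>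
    rw [PySem.List.maxD_id_cons]
    simp only [List.foldl, hf]
    rw [show (if x > 0 then x else 0) = x from by split <;> omega]

-- ===== VERDICT (by name: the statement is the Claim_ definition above) =====
theorem alignRight_spec : Claim_equal_alignRight := by
  intro text _
  unfold Spec_alignRight
  have ht : pvReduceSpaces text = text.map (fun line => String.ofList (pvCollapse line)) := by
    unfold pvReduceSpaces
    rw [PySem.List.foldl_append_singleton_eq_map]
    exact List.map_congr_left (fun s _ => by rw [pvLine_eq])
  simp only [alignRight, alignRight_alt, ht]
  rw [PySem.List.foldl_append_singleton_eq_map]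
  rw [← pvMax_eq]
  simp [List.foldl_map]
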